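-- pv_equiv track=rewrite | github.com/pinata0/Kivy-LocalMusicPlayer | algorithm_1014.py | dfs
-- ===== SOURCE A (Python) =====
-- from typing import List
--
-- def dfs(cur: int, adj: List[List[int]], in_time: List[int], out_time: List[int], sz: List[int], cnt: List[int]) -> int:
--     cnt[0] += 1
--     in_time[cur] = cnt[0]
--     sz[cur] = 1
--     for nxt in adj[cur]:
--         sz[cur] += dfs(nxt, adj, in_time, out_time, sz, cnt)
--     out_time[cur] = cnt[0]
--     return sz[cur]
-- ===== SOURCE B (Python) =====
-- from typing import List
--
-- def dfs(cur: int, adj: List[List[int]], in_time: List[int], out_time: List[int], sz: List[int], cnt: List[int]) -> int: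
--     # Iterative DFS with an explicit stack of [node, next-child-index, accumulated-size] frames.
--     # Return value equals A's; in_time/out_time/cnt get the same final contents, and each sz
--     # entry is written once with its final subtree size instead of incrementally.
--     cnt[0] += 1
--     in_time[cur] = cnt[0]
--     frames = [[cur, 0, 1]]
--     while frames:
--         node, i, acc = frames[-1]
--         row = adj[node]
--         if i < len(row):
--             frames[-1][1] = i + 1
--             child = row[i]
--             cnt[0] += 1
--             in_time[child] = cnt[0]
--             frames.append([child, 0, 1])
--         else:
--             frames.pop()
--             out_time[node] = cnt[0]
--             sz[node] = acc
--             if frames: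
--                 frames[-1][2] += acc
--     return sz[cur]
-- ===== Notes on version B (the rewrite author's own statement) =====
-- stated objective: alternative
-- what changed: replaces A's recursive DFS by an explicit-stack iterative traversal whose frames carry (node, next-child index, accumulated subtree size), popping a frame when its children are exhausted; return value only (B performs the same in_time/out_time/cnt mutations and writes each sz entry once, at pop time, with its final value)
import Mathlib
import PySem

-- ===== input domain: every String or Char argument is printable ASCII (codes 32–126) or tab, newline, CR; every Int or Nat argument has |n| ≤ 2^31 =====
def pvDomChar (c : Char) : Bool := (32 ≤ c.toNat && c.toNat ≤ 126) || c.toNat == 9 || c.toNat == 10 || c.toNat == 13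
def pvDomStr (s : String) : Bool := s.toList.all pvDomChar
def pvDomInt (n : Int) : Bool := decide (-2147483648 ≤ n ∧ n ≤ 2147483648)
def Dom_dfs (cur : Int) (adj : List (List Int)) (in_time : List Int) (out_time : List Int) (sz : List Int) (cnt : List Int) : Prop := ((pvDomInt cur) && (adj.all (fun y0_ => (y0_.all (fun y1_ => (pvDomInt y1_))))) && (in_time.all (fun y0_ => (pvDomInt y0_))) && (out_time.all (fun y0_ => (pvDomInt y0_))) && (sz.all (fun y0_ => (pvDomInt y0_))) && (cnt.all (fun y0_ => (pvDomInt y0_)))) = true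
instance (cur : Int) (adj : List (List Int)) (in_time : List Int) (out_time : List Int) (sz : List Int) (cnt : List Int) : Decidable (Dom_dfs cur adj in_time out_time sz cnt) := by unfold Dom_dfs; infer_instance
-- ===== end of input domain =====

-- B replaces A's recursive DFS by an explicit-stack iterative traversal (objective: alternative).
-- Both functions mutate in_time/out_time/sz/cnt in place; the equivalence proved here is about the
-- RETURN value only (B produces the same final array contents, except that it writes each sz entry
-- once, at pop time, instead of incrementally).

-- The mutable state (in_time, out_time, sz, cnt) threaded through both ports.
structure PvSt where
  it : List Int
  ot : List Int
  sz : List Int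
  cnt : List Int

-- ===== PORT A =====
-- Literal port of A's recursion; the fuel only bounds the recursion depth (Python would recurse
-- forever / raise on a reachable cycle, which Pre_dfs excludes) and is never exhausted under Pre_dfs.
mutual
  def pvGoA (adj : List (List Int)) : Nat → Int → PvSt → Option (Int × PvSt)
    | 0, _, _ => none
    | f+1, cur, st =>
      match PySem.List.pyGet? st.cnt 0 with              -- cnt[0] += 1  (read)
      | none => none
      | some c0 =>
        match PySem.List.pySet? st.cnt 0 (c0 + 1) with   -- cnt[0] += 1  (write)
        | none => none
        | some cnt1 =>
          match PySem.List.pyGet? cnt1 0 with            -- in_time[cur] = cnt[0]  (read)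
          | none => none
          | some c1 =>
            match PySem.List.pySet? st.it cur c1 with    -- in_time[cur] = cnt[0]  (write)
            | none => none
            | some it1 =>
              match PySem.List.pySet? st.sz cur 1 with   -- sz[cur] = 1
              | none => none
              | some sz1 =>
                match PySem.List.pyGet? adj cur with     -- for nxt in adj[cur]:
                | none => none
                | some row =>
                  match pvGoAs adj f cur row ⟨it1, st.ot, sz1, cnt1⟩ with
                  | none => none
                  | some st1 =>
                    match PySem.List.pyGet? st1.cnt 0 with        -- out_time[cur] = cnt[0] (read)
                    | none => none
                    | some c2 =>
                      match PySem.List.pySet? st1.ot cur c2 with  -- out_time[cur] = cnt[0] (write)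
                      | none => none
                      | some ot1 =>
                        match PySem.List.pyGet? st1.sz cur with   -- return sz[cur]
                        | none => none
                        | some v => some (v, ⟨st1.it, ot1, st1.sz, st1.cnt⟩)
  termination_by f _ _ => (f, 0)
  -- the loop 'for nxt in …: sz[cur] += dfs(nxt, …)'; Python reads sz[cur] BEFORE the recursive call
  def pvGoAs (adj : List (List Int)) : Nat → Int → List Int → PvSt → Option PvSt
    | _, _, [], st => some st
    | f, cur, nxt :: rest, st =>
      match PySem.List.pyGet? st.sz cur with             -- sz[cur] += …  (read, before the call)
      | none => none
      | some s =>
        match pvGoA adj f nxt st with                    -- dfs(nxt, …)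
        | none => none
        | some (v, st1) =>
          match PySem.List.pySet? st1.sz cur (s + v) with  -- sz[cur] += …  (write)
          | none => none
          | some sz2 => pvGoAs adj f cur rest ⟨st1.it, st1.ot, sz2, st1.cnt⟩
  termination_by f _ xs _ => (f, xs.length + 1)
end

def dfs (cur : Int) (adj : List (List Int)) (in_time : List Int) (out_time : List Int) (sz : List Int) (cnt : List Int) : Int :=
  match pvGoA adj (adj.length + 2) cur ⟨in_time, out_time, sz, cnt⟩ with
  | some (v, _) => v
  | none => 0

-- ===== PORT B =====
def pvMaxRow (adj : List (List Int)) : Nat := adj.foldr (fun r m => max r.length m) 0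
-- fuel for the while-loop (2·(number of calls A would make) bounds the iteration count; under
-- Pre_dfs it is never exhausted)
def pvFuelB (adj : List (List Int)) : Nat := 2 * (pvMaxRow adj + 1) ^ (adj.length + 2) + 2

-- the while-loop of B: frames carry (node, next-child index, accumulated subtree size)
def pvStepsB (adj : List (List Int)) : Nat → List (Int × Int × Int) → PvSt → Option PvSt
  | _, [], st => some st
  | 0, _ :: _, _ => none
  | F+1, (node, i, acc) :: fr, st =>
    match PySem.List.pyGet? adj node with                -- row = adj[node]
    | none => none
    | some row =>
      if i < (row.length : Int) then                     -- if i < len(row):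
        match PySem.List.pyGet? row i with               --   child = row[i]
        | none => none
        | some child =>
          match PySem.List.pyGet? st.cnt 0 with          --   cnt[0] += 1 (read)
          | none => none
          | some c0 =>
            match PySem.List.pySet? st.cnt 0 (c0 + 1) with  -- cnt[0] += 1 (write)
            | none => none
            | some cnt1 =>
              match PySem.List.pyGet? cnt1 0 with           -- in_time[child] = cnt[0] (read)
              | none => none
              | some c1 =>
                match PySem.List.pySet? st.it child c1 with -- in_time[child] = cnt[0] (write)
                | none => none
                | some it1 =>                               -- push [child, 0, 1]
                  pvStepsB adj F ((child, 0, 1) :: (node, i + 1, acc) :: fr) ⟨it1, st.ot, st.sz, cnt1⟩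
      else                                               -- else: pop
        match PySem.List.pyGet? st.cnt 0 with            --   out_time[node] = cnt[0] (read)
        | none => none
        | some c2 =>
          match PySem.List.pySet? st.ot node c2 with     --   out_time[node] = cnt[0] (write)
          | none => none
          | some ot1 =>
            match PySem.List.pySet? st.sz node acc with  --   sz[node] = acc
            | none => none
            | some sz1 =>
              match fr with
              | [] => some ⟨st.it, ot1, sz1, st.cnt⟩
              | (p, j, b) :: fr' =>                      --   frames[-1][2] += acc
                pvStepsB adj F ((p, j, b + acc) :: fr') ⟨st.it, ot1, sz1, st.cnt⟩

def dfs_alt (cur : Int) (adj : List (List Int)) (in_time : List Int) (out_time : List Int) (sz : List Int) (cnt : List Int) : Int :=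
  match PySem.List.pyGet? cnt 0 with                     -- cnt[0] += 1 (read)
  | none => 0
  | some c0 =>
    match PySem.List.pySet? cnt 0 (c0 + 1) with          -- cnt[0] += 1 (write)
    | none => 0
    | some cnt1 =>
      match PySem.List.pyGet? cnt1 0 with                -- in_time[cur] = cnt[0] (read)
      | none => 0
      | some c1 =>
        match PySem.List.pySet? in_time cur c1 with      -- in_time[cur] = cnt[0] (write)
        | none => 0
        | some it1 =>
          match pvStepsB adj (pvFuelB adj) [(cur, 0, 1)] ⟨it1, out_time, sz, cnt1⟩ with
          | none => 0
          | some stf =>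
            match PySem.List.pyGet? stf.sz cur with      -- return sz[cur]
            | none => 0
            | some v => v

-- ===== PRECONDITION & SPEC =====
-- index validity for the four arrays, as Python checks it (cnt[0] plus a-indexing of the others)
def pvValidB (nIt nOt nSz nCnt : Nat) (a : Int) : Bool :=
  (0 < nCnt : Bool) && (-(nIt : Int) ≤ a && a < (nIt : Int)) && (-(nOt : Int) ≤ a && a < (nOt : Int)) && (-(nSz : Int) ≤ a && a < (nSz : Int))
def pvSucc (adj : List (List Int)) (a : Int) : List Int := (PySem.List.pyGet? adj a).getD []
def pvStepC (adj : List (List Int)) (s : List Int) : List Int := (s ++ s.flatMap (pvSucc adj)).dedup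
def pvClos (adj : List (List Int)) : Nat → List Int → List Int
  | 0, s => s
  | k+1, s => pvClos adj k (pvStepC adj s)
def pvNorm (n : Nat) (a : Int) : Nat := if a < 0 then (a + n).toNat else a.toNat

-- Pre_dfs: exactly the inputs on which A returns (ignoring Python's recursion-depth limit):
-- every node reachable from cur is a valid index for adj and for the three time/size arrays and
-- cnt is nonempty, and no reachable node can reach a node denoting the same adjacency slot again
-- (a reachable cycle makes A recurse forever / raise, an invalid reachable index raises IndexError).
def Pre_dfs (cur : Int) (adj : List (List Int)) (in_time : List Int) (out_time : List Int) (sz : List Int) (cnt : List Int) : Prop :=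
  ∀ a ∈ pvClos adj (adj.length + 1) [cur],
    pvValidB in_time.length out_time.length sz.length cnt.length a = true ∧
    (PySem.List.pyGet? adj a).isSome = true ∧
    ∀ b ∈ pvClos adj (adj.length + 1) (pvSucc adj a), pvNorm adj.length b ≠ pvNorm adj.length a

instance (cur : Int) (adj : List (List Int)) (in_time : List Int) (out_time : List Int) (sz : List Int) (cnt : List Int) : Decidable (Pre_dfs cur adj in_time out_time sz cnt) := by
  unfold Pre_dfs; infer_instance

def pvWitness_dfs : Int × List (List Int) × List Int × List Int × List Int × List Int :=
  (0, [[1, 2], [2], []], [0, 0, 0], [0, 0, 0], [0, 0, 0], [0])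

def Spec_dfs (cur : Int) (adj : List (List Int)) (in_time : List Int) (out_time : List Int) (sz : List Int) (cnt : List Int) (out : Int) : Prop := out = dfs_alt cur adj in_time out_time sz cnt
instance (cur : Int) (adj : List (List Int)) (in_time : List Int) (out_time : List Int) (sz : List Int) (cnt : List Int) (out : Int) : Decidable (Spec_dfs cur adj in_time out_time sz cnt out) := by unfold Spec_dfs; infer_instance

-- ===== CLAIM (what is proved, stated in full; the proofs are below) =====
def Claim_equal_dfs : Prop := ∀ (cur : Int) (adj : List (List Int)) (in_time : List Int) (out_time : List Int) (sz : List Int) (cnt : List Int), Dom_dfs cur adj in_time out_time sz cnt → Pre_dfs cur adj in_time out_time sz cnt → Spec_dfs cur adj in_time out_time sz cnt (dfs cur adj in_time out_time sz cnt)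

-- ===== LEMMAS AND PROOFS =====

theorem pvWitness_ok :
    Dom_dfs pvWitness_dfs.1 pvWitness_dfs.2.1 pvWitness_dfs.2.2.1 pvWitness_dfs.2.2.2.1 pvWitness_dfs.2.2.2.2.1 pvWitness_dfs.2.2.2.2.2 ∧
    Pre_dfs pvWitness_dfs.1 pvWitness_dfs.2.1 pvWitness_dfs.2.2.1 pvWitness_dfs.2.2.2.1 pvWitness_dfs.2.2.2.2.1 pvWitness_dfs.2.2.2.2.2 := by
  constructor <;> decide

-- ---- basic facts about pyGet?/pySet? ----

theorem pvIdx_lt {n : Nat} {i : Int} {k : Nat} (h : PySem.List.pyIdx? n i = some k) : k < n := by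
  unfold PySem.List.pyIdx? at h
  split_ifs at h with h1 h2 h3 <;> simp_all <;> omega

theorem pvGet_ex {α : Type} {xs : List α} {i : Int} (h : PySem.Raise.InRange xs.length i) :
    ∃ x, PySem.List.pyGet? xs i = some x := by
  rcases hx : PySem.List.pyGet? xs i with _ | x
  · exact absurd ((PySem.List.pyGet?_eq_none_iff xs i).mp hx) (not_not_intro h)
  · exact ⟨x, rfl⟩

theorem pvSet_ex {xs : List Int} {i : Int} (v : Int) (h : PySem.Raise.InRange xs.length i) :
    ∃ ys, PySem.List.pySet? xs i v = some ys := by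
  rcases hx : PySem.List.pySet? xs i v with _ | ys
  · exact absurd ((PySem.List.pySet?_eq_none_iff xs i v).mp hx) (not_not_intro h)
  · exact ⟨ys, rfl⟩

theorem pvGet_inRange {α : Type} {xs : List α} {i : Int} {x : α} (h : PySem.List.pyGet? xs i = some x) :
    PySem.Raise.InRange xs.length i := by
  by_contra hc
  rw [(PySem.List.pyGet?_eq_none_iff xs i).mpr hc] at h
  simp at h

theorem pvLenSet {xs ys : List Int} {i v : Int} (h : PySem.List.pySet? xs i v = some ys) :
    ys.length = xs.length := by
  unfold PySem.List.pySet? at h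
  rcases hk : PySem.List.pyIdx? xs.length i with _ | k <;> rw [hk] at h <;> simp only [Option.map_none, Option.map_some] at h
  · exact absurd h (by simp)
  · injection h with h'; rw [← h', List.length_set]

theorem pvGetSet {xs ys : List Int} {i v : Int} (h : PySem.List.pySet? xs i v = some ys) :
    PySem.List.pyGet? ys i = some v := by
  unfold PySem.List.pySet? at h
  rcases hk : PySem.List.pyIdx? xs.length i with _ | k <;> rw [hk] at h <;> simp only [Option.map_none, Option.map_some] at h
  · exact absurd h (by simp)
  · have hlt : k < xs.length := pvIdx_lt hk
    obtain rfl : ys = xs.set k v := by injection h with h'; exact h'.symm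
    unfold PySem.List.pyGet?
    rw [List.length_set, hk]
    simp [hlt]

-- ---- the pure fueled call-count: v = 1 + sum over children (the value both ports return) ----

mutual
  def pvCount (adj : List (List Int)) (nIt nOt nSz nCnt : Nat) : Nat → Int → Option Int
    | 0, _ => none
    | f+1, a =>
      if pvValidB nIt nOt nSz nCnt a then
        match PySem.List.pyGet? adj a with
        | none => none
        | some row =>
          match pvCounts adj nIt nOt nSz nCnt f row with
          | none => none
          | some S => some (1 + S)
      else none
  termination_by f _ => (f, 0)
  def pvCounts (adj : List (List Int)) (nIt nOt nSz nCnt : Nat) : Nat → List Int → Option Int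
    | _, [] => some 0
    | f, x :: xs =>
      match pvCount adj nIt nOt nSz nCnt f x with
      | none => none
      | some v =>
        match pvCounts adj nIt nOt nSz nCnt f xs with
        | none => none
        | some S => some (v + S)
  termination_by f xs => (f, xs.length + 1)
end

theorem pvValidB_iff {nIt nOt nSz nCnt : Nat} {a : Int} :
    pvValidB nIt nOt nSz nCnt a = true ↔
      PySem.Raise.InRange nCnt 0 ∧ PySem.Raise.InRange nIt a ∧ PySem.Raise.InRange nOt a ∧ PySem.Raise.InRange nSz a := by
  unfold pvValidB PySem.Raise.InRange
  simp only [Bool.and_eq_true, decide_eq_true_eq]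
  omega

theorem pvMaxRow_le {adj : List (List Int)} {row : List Int} (h : row ∈ adj) :
    row.length ≤ pvMaxRow adj := by
  induction adj with
  | nil => simp at h
  | cons r rs ih =>
    have hx : pvMaxRow (r :: rs) = max r.length (pvMaxRow rs) := rfl
    rcases List.mem_cons.mp h with rfl | h'
    · omega
    · have := ih h'; omega

theorem pvRow_mem {adj : List (List Int)} {a : Int} {row : List Int}
    (h : PySem.List.pyGet? adj a = some row) : row ∈ adj := by
  unfold PySem.List.pyGet? at h
  rcases hk : PySem.List.pyIdx? adj.length a with _ | k <;> rw [hk] at h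
  · simp at h
  · simp only [Option.bind_some] at h
    exact List.mem_of_getElem? h

-- positivity and the (maxRow+1)^fuel bound on the count
theorem pvCount_bounds (adj : List (List Int)) (nIt nOt nSz nCnt : Nat) : ∀ f : Nat,
    (∀ a v, pvCount adj nIt nOt nSz nCnt f a = some v →
       1 ≤ v ∧ v ≤ ((pvMaxRow adj : Int) + 1) ^ f) ∧
    (∀ xs S, pvCounts adj nIt nOt nSz nCnt f xs = some S →
       0 ≤ S ∧ S ≤ (xs.length : Int) * ((pvMaxRow adj : Int) + 1) ^ f) := by
  have hBpos : (1:Int) ≤ (pvMaxRow adj : Int) + 1 := by omega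
  intro f
  induction f with
  | zero =>
    constructor
    · intro a v h; simp [pvCount] at h
    · intro xs S h
      cases xs with
      | nil =>
        simp only [pvCounts, Option.some.injEq] at h
        subst h; norm_num
      | cons x xs => simp [pvCounts, pvCount] at h
  | succ f ih =>
    have hp : (1:Int) ≤ ((pvMaxRow adj : Int) + 1) ^ f := one_le_pow₀ hBpos
    have h1 : ∀ a v, pvCount adj nIt nOt nSz nCnt (f+1) a = some v →
        1 ≤ v ∧ v ≤ ((pvMaxRow adj : Int) + 1) ^ (f+1) := by
      intro a v h
      rw [pvCount] at h
      split_ifs at h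
      rcases hrow : PySem.List.pyGet? adj a with _ | row <;> rw [hrow] at h <;> dsimp only at h
      · simp at h
      · rcases hS : pvCounts adj nIt nOt nSz nCnt f row with _ | S <;> rw [hS] at h <;> dsimp only at h
        · simp at h
        · injection h with h'
          obtain ⟨hS0, hSle⟩ := ih.2 row S hS
          have hrl : (row.length : Int) ≤ (pvMaxRow adj : Int) := by
            exact_mod_cast pvMaxRow_le (pvRow_mem hrow)
          have hmul : (row.length : Int) * ((pvMaxRow adj : Int) + 1) ^ f ≤
              (pvMaxRow adj : Int) * ((pvMaxRow adj : Int) + 1) ^ f :=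
            mul_le_mul_of_nonneg_right hrl (by linarith)
          constructor
          · omega
          · rw [← h', pow_succ]; nlinarith
    refine ⟨h1, ?_⟩
    intro xs S h
    induction xs generalizing S with
    | nil =>
      simp only [pvCounts, Option.some.injEq] at h
      subst h; norm_num
    | cons x xs ihx =>
      rw [pvCounts] at h
      rcases hv : pvCount adj nIt nOt nSz nCnt (f+1) x with _ | v <;> rw [hv] at h <;> dsimp only at h
      · simp at h
      · rcases hS' : pvCounts adj nIt nOt nSz nCnt (f+1) xs with _ | S' <;> rw [hS'] at h <;> dsimp only at h
        · simp at h
        · injection h with h'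
          obtain ⟨hv1, hvle⟩ := h1 x v hv
          obtain ⟨hS0, hSle⟩ := ihx S' hS'
          constructor
          · omega
          · rw [← h']
            have : ((x :: xs).length : Int) = (xs.length : Int) + 1 := by simp
            rw [this]; nlinarith

-- success and value transfer from the pure count to port A's execution
theorem pvPA (adj : List (List Int)) (nIt nOt nSz nCnt : Nat) : ∀ f : Nat,
    (∀ a v (st : PvSt), st.it.length = nIt → st.ot.length = nOt → st.sz.length = nSz → st.cnt.length = nCnt →
       pvCount adj nIt nOt nSz nCnt f a = some v →
       ∃ st' : PvSt, pvGoA adj f a st = some (v, st') ∧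
         st'.it.length = nIt ∧ st'.ot.length = nOt ∧ st'.sz.length = nSz ∧ st'.cnt.length = nCnt) ∧
    (∀ c xs S s (st : PvSt), st.it.length = nIt → st.ot.length = nOt → st.sz.length = nSz → st.cnt.length = nCnt →
       pvCounts adj nIt nOt nSz nCnt f xs = some S →
       PySem.List.pyGet? st.sz c = some s →
       ∃ st' : PvSt, pvGoAs adj f c xs st = some st' ∧
         st'.it.length = nIt ∧ st'.ot.length = nOt ∧ st'.sz.length = nSz ∧ st'.cnt.length = nCnt ∧
         PySem.List.pyGet? st'.sz c = some (s + S)) := by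
  intro f
  induction f with
  | zero =>
    constructor
    · intro a v st _ _ _ _ h; simp [pvCount] at h
    · intro c xs S s st h1 h2 h3 h4 hS hread
      cases xs with
      | nil =>
        simp only [pvCounts, Option.some.injEq] at hS
        subst hS
        exact ⟨st, by rw [pvGoAs], h1, h2, h3, h4, by simpa using hread⟩
      | cons x xs => simp [pvCounts, pvCount] at hS
  | succ f ih =>
    have h1 : ∀ a v (st : PvSt), st.it.length = nIt → st.ot.length = nOt → st.sz.length = nSz → st.cnt.length = nCnt →
        pvCount adj nIt nOt nSz nCnt (f+1) a = some v →
        ∃ st' : PvSt, pvGoA adj (f+1) a st = some (v, st') ∧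
          st'.it.length = nIt ∧ st'.ot.length = nOt ∧ st'.sz.length = nSz ∧ st'.cnt.length = nCnt := by
      intro a v st hit hot hsz hcnt h
      rw [pvCount] at h
      by_cases hval : pvValidB nIt nOt nSz nCnt a = true
      swap
      · rw [if_neg hval] at h; simp at h
      rw [if_pos hval] at h
      rcases hrow : PySem.List.pyGet? adj a with _ | row <;> rw [hrow] at h <;> dsimp only at h
      · simp at h
      rcases hS : pvCounts adj nIt nOt nSz nCnt f row with _ | S <;> rw [hS] at h <;> dsimp only at h
      · simp at h
      injection h with hv
      obtain ⟨hcnt0, hitR, hotR, hszR⟩ := pvValidB_iff.mp hval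
      obtain ⟨c0, hc0⟩ := pvGet_ex (xs := st.cnt) (i := 0) (by rw [hcnt]; exact hcnt0)
      obtain ⟨cnt1, hcnt1⟩ := pvSet_ex (xs := st.cnt) (i := 0) (c0 + 1) (by rw [hcnt]; exact hcnt0)
      have hcnt1len : cnt1.length = nCnt := by rw [pvLenSet hcnt1, hcnt]
      obtain ⟨c1, hc1⟩ := pvGet_ex (xs := cnt1) (i := 0) (by rw [hcnt1len]; exact hcnt0)
      obtain ⟨it1, hit1⟩ := pvSet_ex (xs := st.it) (i := a) c1 (by rw [hit]; exact hitR)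
      have hit1len : it1.length = nIt := by rw [pvLenSet hit1, hit]
      obtain ⟨sz1, hsz1⟩ := pvSet_ex (xs := st.sz) (i := a) 1 (by rw [hsz]; exact hszR)
      have hsz1len : sz1.length = nSz := by rw [pvLenSet hsz1, hsz]
      obtain ⟨st1, hst1, l1, l2, l3, l4, hfinal⟩ :=
        ih.2 a row S 1 ⟨it1, st.ot, sz1, cnt1⟩ hit1len hot hsz1len hcnt1len hS (pvGetSet hsz1)
      obtain ⟨c2, hc2⟩ := pvGet_ex (xs := st1.cnt) (i := 0) (by rw [l4]; exact hcnt0)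
      obtain ⟨ot1, hot1⟩ := pvSet_ex (xs := st1.ot) (i := a) c2 (by rw [l2]; exact hotR)
      refine ⟨⟨st1.it, ot1, st1.sz, st1.cnt⟩, ?_, l1, by rw [pvLenSet hot1, l2], l3, l4⟩
      rw [pvGoA]
      simp only [hc0, hcnt1, hc1, hit1, hsz1, hrow, hst1, hc2, hot1, hfinal, hv]
    refine ⟨h1, ?_⟩
    intro c xs S s st hit hot hsz hcnt hS hread
    induction xs generalizing S s st with
    | nil =>
      simp only [pvCounts, Option.some.injEq] at hS
      subst hS
      exact ⟨st, by rw [pvGoAs], hit, hot, hsz, hcnt, by simpa using hread⟩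
    | cons x xs ihx =>
      rw [pvCounts] at hS
      rcases hv : pvCount adj nIt nOt nSz nCnt (f+1) x with _ | v <;> rw [hv] at hS <;> dsimp only at hS
      · simp at hS
      rcases hS' : pvCounts adj nIt nOt nSz nCnt (f+1) xs with _ | S' <;> rw [hS'] at hS <;> dsimp only at hS
      · simp at hS
      injection hS with hSv
      have hcIn : PySem.Raise.InRange st.sz.length c := pvGet_inRange hread
      obtain ⟨st1, hst1, l1, l2, l3, l4⟩ := h1 x v st hit hot hsz hcnt hv
      obtain ⟨sz2, hsz2⟩ := pvSet_ex (xs := st1.sz) (i := c) (s + v)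
        (by rw [l3, ← hsz]; exact hcIn)
      have hsz2len : sz2.length = nSz := by rw [pvLenSet hsz2, l3]
      obtain ⟨st2, hst2, m1, m2, m3, m4, hfin⟩ :=
        ihx S' (s + v) ⟨st1.it, st1.ot, sz2, st1.cnt⟩ l1 l2 hsz2len l4 hS' (pvGetSet hsz2)
      refine ⟨st2, ?_, m1, m2, m3, m4, ?_⟩
      · rw [pvGoAs]
        simp only [hread, hst1, hsz2, hst2]
      · rw [hfin]
        congr 1
        omega

-- the B-side simulation: processing one frame (node, i, acc) with the remaining children
-- rem = row.drop i.toNat consumes 2·(total calls)+1 loop iterations, writes sz[node] last,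
-- and hands acc + S to the parent frame
theorem pvL (adj : List (List Int)) (nIt nOt nSz nCnt : Nat) :
    ∀ f : Nat, ∀ (rem row : List Int) (node i acc : Int) (fr : List (Int × Int × Int)) (S : Int),
    PySem.List.pyGet? adj node = some row →
    0 ≤ i → row.drop i.toNat = rem →
    pvValidB nIt nOt nSz nCnt node = true →
    pvCounts adj nIt nOt nSz nCnt f rem = some S →
    ∃ c : Nat, c ≤ 2 * S.toNat + 1 ∧ ∀ (F : Nat) (st : PvSt),
      st.it.length = nIt → st.ot.length = nOt → st.sz.length = nSz → st.cnt.length = nCnt →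
      ∃ st₂ : PvSt, st₂.it.length = nIt ∧ st₂.ot.length = nOt ∧ st₂.sz.length = nSz ∧ st₂.cnt.length = nCnt ∧
        PySem.List.pyGet? st₂.sz node = some (acc + S) ∧
        pvStepsB adj (F + c) ((node, i, acc) :: fr) st =
          (match fr with
           | [] => some st₂
           | (p, j, b) :: fr' => pvStepsB adj F ((p, j, b + (acc + S)) :: fr') st₂) := by
  intro f
  induction f using Nat.strongRecOn with
  | ind f IH =>
  intro rem row node i acc fr S hrow hi hrem hval hS
  induction rem generalizing i acc S with
  | nil =>
    simp only [pvCounts, Option.some.injEq] at hS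
    subst hS
    simp only [add_zero]
    obtain ⟨hcnt0, hitR, hotR, hszR⟩ := pvValidB_iff.mp hval
    refine ⟨1, by omega, ?_⟩
    intro F st hit hot hsz hcnt
    have hlen : row.length ≤ i.toNat := by
      have := congrArg List.length hrem
      rw [List.length_drop] at this
      simp at this; omega
    have hnlt : ¬ (i < (row.length : Int)) := by omega
    obtain ⟨c2, hc2⟩ := pvGet_ex (xs := st.cnt) (i := 0) (by rw [hcnt]; exact hcnt0)
    obtain ⟨ot1, hot1⟩ := pvSet_ex (xs := st.ot) (i := node) c2 (by rw [hot]; exact hotR)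
    obtain ⟨sz1, hsz1⟩ := pvSet_ex (xs := st.sz) (i := node) acc (by rw [hsz]; exact hszR)
    refine ⟨⟨st.it, ot1, sz1, st.cnt⟩, hit, by rw [pvLenSet hot1, hot], by rw [pvLenSet hsz1, hsz], hcnt,
      pvGetSet hsz1, ?_⟩
    rw [pvStepsB, hrow]
    dsimp only
    rw [if_neg hnlt]
    simp only [hc2, hot1, hsz1]
  | cons x rem' ihr =>
    rw [pvCounts] at hS
    rcases hv : pvCount adj nIt nOt nSz nCnt f x with _ | v <;> rw [hv] at hS <;> dsimp only at hS
    · simp at hS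
    rcases hS' : pvCounts adj nIt nOt nSz nCnt f rem' with _ | S' <;> rw [hS'] at hS <;> dsimp only at hS
    · simp at hS
    injection hS with hSv
    -- unfold the child's count
    cases f with
    | zero => simp [pvCount] at hv
    | succ f' =>
    rw [pvCount] at hv
    by_cases hvalx : pvValidB nIt nOt nSz nCnt x = true
    swap
    · rw [if_neg hvalx] at hv; simp at hv
    rw [if_pos hvalx] at hv
    rcases hrowx : PySem.List.pyGet? adj x with _ | rowx <;> rw [hrowx] at hv <;> dsimp only at hv
    · simp at hv
    rcases hSx : pvCounts adj nIt nOt nSz nCnt f' rowx with _ | Sx <;> rw [hSx] at hv <;> dsimp only at hv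
    · simp at hv
    injection hv with hv2
    -- index facts
    have hitoNat : i.toNat < row.length := by
      have := congrArg List.length hrem
      rw [List.length_drop] at this
      simp at this; omega
    have hlt : i < (row.length : Int) := by omega
    have hx : PySem.List.pyGet? row i = some x := by
      have h0 : row[i.toNat]? = some x := by
        have hgd := List.getElem?_drop (xs := row) (i := i.toNat) (j := 0)
        rw [hrem] at hgd; simpa using hgd.symm
      unfold PySem.List.pyGet? PySem.List.pyIdx?
      rw [if_pos hi, if_pos hlt]
      simpa using h0
    have hrem' : row.drop (i + 1).toNat = rem' := by
      have : (i + 1).toNat = i.toNat + 1 := by omega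
      rw [this, ← List.tail_drop, hrem]; rfl
    -- recursive pieces
    obtain ⟨c₁, hc₁le, hrun₁⟩ := IH f' (by omega) rowx rowx x 0 1 ((node, i + 1, acc) :: fr) Sx hrowx
      (by omega) (by simp) hvalx hSx
    obtain ⟨c₂, hc₂le, hrun₂⟩ := ihr (i + 1) (acc + v) S' (by omega) hrem' hS'
    -- positivity for the fuel bound
    obtain ⟨hSx0, -⟩ := (pvCount_bounds adj nIt nOt nSz nCnt f').2 rowx Sx hSx
    obtain ⟨hS'0, -⟩ := (pvCount_bounds adj nIt nOt nSz nCnt (f' + 1)).2 rem' S' hS'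
    refine ⟨1 + c₁ + c₂, by omega, ?_⟩
    intro F st hit hot hsz hcnt
    obtain ⟨hcnt0x, hitRx, hotRx, hszRx⟩ := pvValidB_iff.mp hvalx
    obtain ⟨c0, hc0⟩ := pvGet_ex (xs := st.cnt) (i := 0) (by rw [hcnt]; exact hcnt0x)
    obtain ⟨cnt1, hcnt1⟩ := pvSet_ex (xs := st.cnt) (i := 0) (c0 + 1) (by rw [hcnt]; exact hcnt0x)
    have hcnt1len : cnt1.length = nCnt := by rw [pvLenSet hcnt1, hcnt]
    obtain ⟨c1, hc1⟩ := pvGet_ex (xs := cnt1) (i := 0) (by rw [hcnt1len]; exact hcnt0x)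
    obtain ⟨it1, hit1⟩ := pvSet_ex (xs := st.it) (i := x) c1 (by rw [hit]; exact hitRx)
    have hit1len : it1.length = nIt := by rw [pvLenSet hit1, hit]
    -- run the child's frame
    obtain ⟨st₂', n1, n2, n3, n4, hread', heq₁⟩ :=
      hrun₁ (F + c₂) ⟨it1, st.ot, st.sz, cnt1⟩ hit1len hot hsz hcnt1len
    dsimp only at heq₁
    -- run the rest of this frame
    obtain ⟨st₂, m1, m2, m3, m4, hread₂, heq₂⟩ := hrun₂ F st₂' n1 n2 n3 n4
    have hacc : acc + v + S' = acc + S := by omega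
    rw [hacc] at hread₂ heq₂
    refine ⟨st₂, m1, m2, m3, m4, hread₂, ?_⟩
    have hfuel : F + (1 + c₁ + c₂) = (F + c₂ + c₁) + 1 := by omega
    rw [hfuel, pvStepsB, hrow]
    dsimp only
    rw [if_pos hlt]
    simp only [hx, hc0, hcnt1, hc1, hit1]
    rw [hv2] at heq₁
    rw [heq₁, heq₂]

-- ---- chains, closure, and the termination argument extracted from Pre_dfs ----

def pvChain (adj : List (List Int)) : Int → List Int → Prop
  | _, [] => True
  | a, b :: l => b ∈ pvSucc adj a ∧ pvChain adj b l

def pvChainL (adj : List (List Int)) : List Int → Prop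
  | [] => True
  | [_] => True
  | a :: b :: l => b ∈ pvSucc adj a ∧ pvChainL adj (b :: l)

theorem pvChainL_cons {adj : List (List Int)} {a : Int} {l : List Int} :
    pvChainL adj (a :: l) ↔ pvChain adj a l := by
  induction l generalizing a with
  | nil => simp [pvChainL, pvChain]
  | cons b l ih => rw [pvChainL, pvChain, ih]

theorem pvChainL_right {adj : List (List Int)} : ∀ {u v : List Int}, pvChainL adj (u ++ v) → pvChainL adj v := by
  intro u
  induction u with
  | nil => intro v h; exact h
  | cons a u' ih =>
    intro v h
    apply ih
    cases hu : u' ++ v with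
    | nil => exact trivial
    | cons b w =>
      rw [List.cons_append, hu, pvChainL] at h
      exact h.2

theorem pvChainL_left {adj : List (List Int)} : ∀ {u v : List Int}, pvChainL adj (u ++ v) → pvChainL adj u := by
  intro u
  induction u with
  | nil => intro v _; exact trivial
  | cons a u' ih =>
    intro v h
    cases u' with
    | nil => simp [pvChainL]
    | cons b w =>
      rw [List.cons_append, List.cons_append, pvChainL] at h
      rw [pvChainL]
      exact ⟨h.1, ih (by rw [List.cons_append]; exact h.2)⟩

theorem pvChain_take {adj : List (List Int)} : ∀ {l : List Int} {a : Int} (k : Nat),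
    pvChain adj a l → pvChain adj a (l.take k) := by
  intro l
  induction l with
  | nil => intro a k h; simp [h]
  | cons b l' ih =>
    intro a k h
    cases k with
    | zero => exact trivial
    | succ k' => exact ⟨h.1, ih k' h.2⟩

theorem pvStepC_mem {adj : List (List Int)} {s : List Int} {x : Int} :
    x ∈ pvStepC adj s ↔ x ∈ s ∨ ∃ a ∈ s, x ∈ pvSucc adj a := by
  simp [pvStepC, List.mem_dedup, List.mem_append, List.mem_flatMap]

theorem pvClos_ext {adj : List (List Int)} : ∀ (k : Nat) {s : List Int} {x : Int},
    x ∈ s → x ∈ pvClos adj k s := by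
  intro k
  induction k with
  | zero => intro s x h; exact h
  | succ k ih =>
    intro s x h
    rw [pvClos]
    exact ih (pvStepC_mem.mpr (Or.inl h))

theorem pvClos_mono {adj : List (List Int)} : ∀ (k : Nat) {s t : List Int},
    (∀ x ∈ s, x ∈ t) → ∀ x ∈ pvClos adj k s, x ∈ pvClos adj k t := by
  intro k
  induction k with
  | zero => intro s t hst x hx; exact hst x hx
  | succ k ih =>
    intro s t hst x hx
    rw [pvClos] at *
    refine ih ?_ x hx
    intro y hy
    rcases pvStepC_mem.mp hy with h | ⟨a, ha, hya⟩
    · exact pvStepC_mem.mpr (Or.inl (hst y h))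
    · exact pvStepC_mem.mpr (Or.inr ⟨a, hst a ha, hya⟩)

theorem pvChain_clos {adj : List (List Int)} : ∀ {l : List Int} {a b : Int} {k : Nat},
    pvChain adj a (l ++ [b]) → l.length ≤ k → b ∈ pvClos adj k (pvSucc adj a) := by
  intro l
  induction l with
  | nil => intro a b k h _; exact pvClos_ext k h.1
  | cons c l' ih =>
    intro a b k h hk
    cases k with
    | zero => simp at hk
    | succ k' =>
      have hb : b ∈ pvClos adj k' (pvSucc adj c) := ih h.2 (by simpa using hk)
      rw [pvClos]
      refine pvClos_mono k' ?_ b hb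
      intro y hy
      exact pvStepC_mem.mpr (Or.inr ⟨c, h.1, hy⟩)

theorem pvChain_clos0 {adj : List (List Int)} : ∀ {l : List Int} {a : Int} {k : Nat},
    pvChain adj a l → l.length ≤ k → ∀ x ∈ l, x ∈ pvClos adj k [a] := by
  intro l
  induction l with
  | nil => intro a k _ _ x hx; simp at hx
  | cons c l' ih =>
    intro a k h hk x hx
    cases k with
    | zero => simp at hk
    | succ k' =>
      rw [pvClos]
      have hcs : c ∈ pvStepC adj [a] := pvStepC_mem.mpr (Or.inr ⟨a, by simp, h.1⟩)
      rcases List.mem_cons.mp hx with rfl | hx'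
      · exact pvClos_ext k' hcs
      · refine pvClos_mono k' ?_ x (ih h.2 (by simpa using hk) x hx')
        intro y hy
        rw [List.mem_singleton] at hy
        subst hy
        exact hcs

theorem pvChain_snoc {adj : List (List Int)} : ∀ {u : List Int} {cur a x : Int},
    pvChain adj cur (u ++ [a]) → x ∈ pvSucc adj a → pvChain adj cur ((u ++ [a]) ++ [x]) := by
  intro u
  induction u with
  | nil => intro cur a x h hx; exact ⟨h.1, hx, trivial⟩
  | cons c u' ih =>
    intro cur a x h hx
    exact ⟨h.1, ih h.2 hx⟩

theorem pvDupSplit : ∀ (L : List Nat), ¬ L.Nodup → ∃ L₁ m L₂ L₃, L = L₁ ++ (m :: (L₂ ++ (m :: L₃))) := by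
  intro L
  induction L with
  | nil => intro h; exact absurd List.nodup_nil h
  | cons y L' ih =>
    intro h
    by_cases hy : y ∈ L'
    · obtain ⟨s, t, rfl⟩ := List.append_of_mem hy
      exact ⟨[], y, s, t, by simp⟩
    · have h' : ¬ L'.Nodup := fun hn => h (List.nodup_cons.mpr ⟨hy, hn⟩)
      obtain ⟨L₁, m, L₂, L₃, rfl⟩ := ih h'
      exact ⟨y :: L₁, m, L₂, L₃, by simp⟩

theorem pvPigeon {L : List Nat} {n : Nat} (hlt : ∀ x ∈ L, x < n) (hn : n < L.length) :
    ¬ L.Nodup := by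
  intro hnd
  have hcard := List.toFinset_card_of_nodup hnd
  have hsub : L.toFinset ⊆ Finset.range n := by
    intro x hx
    rw [List.mem_toFinset] at hx
    exact Finset.mem_range.mpr (hlt x hx)
  have := Finset.card_le_card hsub
  rw [hcard, Finset.card_range] at this
  omega

theorem pvMapSplit {T : List Int} {g : Int → Nat} {L₁ L₂ L₃ : List Nat} {m : Nat}
    (h : T.map g = L₁ ++ (m :: (L₂ ++ (m :: L₃)))) :
    ∃ T₁ a T₂ b T₃, T = T₁ ++ (a :: (T₂ ++ (b :: T₃))) ∧ g a = m ∧ g b = m := by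
  obtain ⟨t₁, rest, rfl, h₁, h₂⟩ := List.map_eq_append_iff.mp h
  obtain ⟨a, rest', rfl, ha, h₃⟩ := List.map_eq_cons_iff.mp h₂
  obtain ⟨t₂, rest'', rfl, h₄, h₅⟩ := List.map_eq_append_iff.mp h₃
  obtain ⟨b, t₃, rfl, hb, h₆⟩ := List.map_eq_cons_iff.mp h₅
  exact ⟨t₁, a, t₂, b, t₃, rfl, ha, hb⟩

theorem pvNorm_lt {n : Nat} {a : Int} (h : PySem.Raise.InRange n a) : pvNorm n a < n := by
  unfold pvNorm
  unfold PySem.Raise.InRange at h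
  split_ifs <;> omega

-- under Pre_dfs, every chain of successive adjacency entries starting at cur is short
theorem pvChainBound {cur : Int} {adj : List (List Int)} {it ot sz cnt : List Int}
    (hpre : Pre_dfs cur adj it ot sz cnt) :
    ∀ l, pvChain adj cur l → l.length ≤ adj.length + 1 := by
  intro l hl
  by_contra hcon
  push_neg at hcon
  have ht : pvChain adj cur (l.take (adj.length + 1)) := pvChain_take _ hl
  have htlen : (l.take (adj.length + 1)).length = adj.length + 1 := by
    rw [List.length_take]; omega
  have hmemT : ∀ x ∈ cur :: l.take (adj.length + 1), x ∈ pvClos adj (adj.length + 1) [cur] := by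
    intro x hx
    rcases List.mem_cons.mp hx with rfl | hx'
    · exact pvClos_ext _ (by simp)
    · exact pvChain_clos0 ht htlen.le x hx'
  have hnormlt : ∀ y ∈ (cur :: l.take (adj.length + 1)).map (pvNorm adj.length), y < adj.length := by
    intro y hy
    rw [List.mem_map] at hy
    obtain ⟨x, hx, rfl⟩ := hy
    have hre := hpre x (hmemT x hx)
    obtain ⟨row', hrow'⟩ := Option.isSome_iff_exists.mp hre.2.1
    exact pvNorm_lt (pvGet_inRange hrow')
  have hnd : ¬ ((cur :: l.take (adj.length + 1)).map (pvNorm adj.length)).Nodup := by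
    apply pvPigeon hnormlt
    rw [List.length_map, List.length_cons, htlen]; omega
  obtain ⟨L₁, m, L₂, L₃, hdec⟩ := pvDupSplit _ hnd
  obtain ⟨T₁, a, T₂, b, T₃, hTdec, hga, hgb⟩ := pvMapSplit hdec
  have hchL : pvChainL adj (cur :: l.take (adj.length + 1)) := pvChainL_cons.mpr ht
  rw [hTdec] at hchL
  have hseg1 : pvChainL adj (a :: (T₂ ++ (b :: T₃))) := pvChainL_right hchL
  have hassoc : a :: (T₂ ++ (b :: T₃)) = (a :: (T₂ ++ [b])) ++ T₃ := by simp
  rw [hassoc] at hseg1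
  have hseg : pvChain adj a (T₂ ++ [b]) := pvChainL_cons.mp (pvChainL_left hseg1)
  have hT2len : T₂.length ≤ adj.length + 1 := by
    have := congrArg List.length hTdec
    simp at this
    omega
  have hb : b ∈ pvClos adj (adj.length + 1) (pvSucc adj a) := pvChain_clos hseg hT2len
  have haT : a ∈ cur :: l.take (adj.length + 1) := by rw [hTdec]; simp
  have hre := hpre a (hmemT a haT)
  exact hre.2.2 b hb (by rw [hga, hgb])

-- under Pre_dfs the pure count (hence A's recursion) succeeds on every reachable node
theorem pvCountSome {cur : Int} {adj : List (List Int)} {it ot sz cnt : List Int}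
    (hpre : Pre_dfs cur adj it ot sz cnt) :
    ∀ (f : Nat) (a : Int),
      (a = cur ∨ ∃ p, pvChain adj cur (p ++ [a])) →
      (∀ l, pvChain adj a l → l.length < f) →
      ∃ v, pvCount adj it.length ot.length sz.length cnt.length f a = some v := by
  intro f
  induction f with
  | zero =>
    intro a hp hb
    exact absurd (hb [] trivial) (by simp)
  | succ f ih =>
    intro a hp hb
    have hmem : a ∈ pvClos adj (adj.length + 1) [cur] := by
      rcases hp with rfl | ⟨p, hch⟩
      · exact pvClos_ext _ (by simp)
      · have hlen : (p ++ [a]).length ≤ adj.length + 1 := pvChainBound hpre _ hch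
        exact pvChain_clos0 hch hlen a (by simp)
    obtain ⟨hval, hsome, -⟩ := hpre a hmem
    obtain ⟨row, hrow⟩ := Option.isSome_iff_exists.mp hsome
    have hsucc : pvSucc adj a = row := by unfold pvSucc; rw [hrow]; rfl
    have hcnts : ∀ ys, (∀ x ∈ ys, x ∈ row) →
        ∃ S, pvCounts adj it.length ot.length sz.length cnt.length f ys = some S := by
      intro ys
      induction ys with
      | nil => exact fun _ => ⟨0, by rw [pvCounts]⟩
      | cons x ys ihy =>
        intro hsub
        have hx : x ∈ pvSucc adj a := by rw [hsucc]; exact hsub x (by simp)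
        have hpx : x = cur ∨ ∃ p, pvChain adj cur (p ++ [x]) := by
          rcases hp with rfl | ⟨p, hch⟩
          · exact Or.inr ⟨[], ⟨hx, trivial⟩⟩
          · exact Or.inr ⟨p ++ [a], pvChain_snoc hch hx⟩
        obtain ⟨v, hv⟩ := ih x hpx (fun l hl => by
          have := hb (x :: l) ⟨hx, hl⟩
          simp at this; omega)
        obtain ⟨S, hS⟩ := ihy (fun y hy => hsub y (by simp [hy]))
        refine ⟨v + S, ?_⟩
        rw [pvCounts, hv]
        dsimp only
        rw [hS]
    obtain ⟨S, hS⟩ := hcnts row (fun x hx => hx)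
    refine ⟨1 + S, ?_⟩
    rw [pvCount, if_pos hval, hrow]
    dsimp only
    rw [hS]

-- ===== VERDICT (by name: the statement is the Claim_ definition above) =====
theorem dfs_spec : Claim_equal_dfs := by
  intro cur adj it ot sz cnt _ hpre
  unfold Spec_dfs
  obtain ⟨v, hv0⟩ := pvCountSome hpre (adj.length + 2) cur (Or.inl rfl)
    (fun l hl => by have := pvChainBound hpre l hl; omega)
  obtain ⟨st', hA, -, -, -, -⟩ :=
    (pvPA adj it.length ot.length sz.length cnt.length (adj.length + 2)).1 cur v ⟨it, ot, sz, cnt⟩ rfl rfl rfl rfl hv0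
  have hdfs : dfs cur adj it ot sz cnt = v := by unfold dfs; rw [hA]
  have hv := hv0
  rw [pvCount] at hv
  by_cases hval : pvValidB it.length ot.length sz.length cnt.length cur = true
  swap
  · rw [if_neg hval] at hv; simp at hv
  rw [if_pos hval] at hv
  rcases hrow : PySem.List.pyGet? adj cur with _ | row <;> rw [hrow] at hv <;> dsimp only at hv
  · simp at hv
  rcases hS : pvCounts adj it.length ot.length sz.length cnt.length (adj.length + 1) row with _ | S <;> rw [hS] at hv <;> dsimp only at hv
  · simp at hv
  injection hv with hv1
  obtain ⟨hcnt0, hitR, hotR, hszR⟩ := pvValidB_iff.mp hval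
  obtain ⟨c0, hc0⟩ := pvGet_ex (xs := cnt) (i := 0) hcnt0
  obtain ⟨cnt1, hcnt1⟩ := pvSet_ex (xs := cnt) (i := 0) (c0 + 1) hcnt0
  have hcnt1len : cnt1.length = cnt.length := pvLenSet hcnt1
  obtain ⟨c1, hc1⟩ := pvGet_ex (xs := cnt1) (i := 0) (by rw [hcnt1len]; exact hcnt0)
  obtain ⟨it1, hit1⟩ := pvSet_ex (xs := it) (i := cur) c1 hitR
  obtain ⟨c, hcle, hrun⟩ := pvL adj it.length ot.length sz.length cnt.length (adj.length + 1)
    row row cur 0 1 [] S hrow (by omega) (by simp) hval hS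
  obtain ⟨hv1le, hvle⟩ := (pvCount_bounds adj it.length ot.length sz.length cnt.length (adj.length + 2)).1 cur v hv0
  have hcast : ((pvMaxRow adj : Int) + 1) ^ (adj.length + 2) = (((pvMaxRow adj + 1) ^ (adj.length + 2) : Nat) : Int) := by
    push_cast; ring
  have hcfuel : c ≤ pvFuelB adj := by
    unfold pvFuelB
    have hvN : v.toNat ≤ (pvMaxRow adj + 1) ^ (adj.length + 2) := by
      rw [hcast] at hvle; omega
    omega
  obtain ⟨st₂, -, -, -, -, hread, heq⟩ := hrun (pvFuelB adj - c) ⟨it1, ot, sz, cnt1⟩ (pvLenSet hit1) rfl rfl hcnt1len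
  dsimp only at heq
  rw [Nat.sub_add_cancel hcfuel] at heq
  have halt : dfs_alt cur adj it ot sz cnt = v := by
    unfold dfs_alt
    simp only [hc0, hcnt1, hc1, hit1, heq, hread, hv1]
  rw [hdfs, halt]
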